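-- pv_equiv track=rewrite | github.com/eoc940/Python-data_structure-and-algorithm_PS | programmers-algorythm/kakao/2018_kakao_blind/file_sort_re.py | file_sort
-- ===== SOURCE A (Python) =====
-- def file_sort(files):
--     answer = []
--     file_split = []
--     for file in files:
--         number_idx, tail_idx = 0,0
--         for idx, word in enumerate(file):
--             if word.isdigit():
--                 number_idx = idx
--                 break
--         for idx in range(number_idx, len(file)):
--             if not file[idx].isdigit():
--                 tail_idx = idx
--                 break
--         if tail_idx == 0: # tail이 없는 경우
--             file_split.append([file[:number_idx], file[number_idx:], ''])
--         else: # tail이 있는 경우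
--             file_split.append([file[:number_idx], file[number_idx:tail_idx], file[tail_idx:]])
--
--     file_split.sort(key=lambda x : (x[0].lower(),int(x[1])))
--
--     return [''.join(file) for file in file_split]
-- ===== SOURCE B (Python) =====
-- def file_sort(files):
--     # Bucket grouping: one pass groups files (stably) under their (head.lower(), int(number))
--     # key in a dict, then only the DISTINCT keys are sorted and the buckets concatenated.
--     groups = {}
--     for f in files:
--         i = 0
--         while i < len(f) and not f[i].isdigit():
--             i += 1
--         j = i
--         while j < len(f) and f[j].isdigit():
--             j += 1
--         groups.setdefault((f[:i].lower(), int(f[i:j])), []).append(f)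
--     return [f for k in sorted(groups) for f in groups[k]]
-- ===== Notes on version B (the rewrite author's own statement) =====
-- stated objective: alternative
-- what changed: Instead of A's decorate-sort-join (split every file into a [head,number,tail] triple, sort all triples by key, rejoin), B does a bucket grouping: one pass appends each file to a dict bucket keyed by (head.lower(), int(number)), then only the distinct keys are sorted and the buckets concatenated in key order; stability comes from insertion order inside each bucket.
import Mathlib
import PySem

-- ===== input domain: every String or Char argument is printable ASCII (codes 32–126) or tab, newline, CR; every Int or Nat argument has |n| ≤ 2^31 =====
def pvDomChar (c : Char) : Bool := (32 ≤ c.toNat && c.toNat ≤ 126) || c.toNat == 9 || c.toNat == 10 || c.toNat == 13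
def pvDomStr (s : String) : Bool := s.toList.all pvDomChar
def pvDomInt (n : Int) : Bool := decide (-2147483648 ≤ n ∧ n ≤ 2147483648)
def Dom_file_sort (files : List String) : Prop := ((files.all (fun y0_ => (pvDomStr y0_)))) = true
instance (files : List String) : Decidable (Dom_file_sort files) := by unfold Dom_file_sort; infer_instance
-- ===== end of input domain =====

-- B replaces A's split-into-triples / sort-all / rejoin pipeline by bucket grouping: one pass
-- collects the files into dict buckets keyed by (head.lower(), int(number)), only the distinct
-- keys are sorted, and the buckets are concatenated; return values proved equal wherever A returns.

-- ===== PORT A =====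
-- Strings are handled as their char lists (exact on the ASCII domain); 'word.isdigit()' on one
-- printable-ASCII char is Char.isDigit; slices with nonnegative in-range indices are take/drop (exact here).

-- 'number_idx = 0; for idx, word in enumerate(file): if word.isdigit(): number_idx = idx; break'
-- (number_idx stays 0 when the loop never breaks)
def aNumIdx : List Char → Nat → Nat
  | [], _ => 0
  | c :: rest, idx => if c.isDigit then idx else aNumIdx rest (idx + 1)

-- 'tail_idx = 0; for idx in range(number_idx, len(file)): if not file[idx].isdigit(): tail_idx = idx; break'
-- reading file[idx] for idx in range(n, len(file)) walks over file[n:]; tail_idx stays 0 on no break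
def aTailIdx : List Char → Nat → Nat
  | [], _ => 0
  | c :: rest, idx => if !c.isDigit then idx else aTailIdx rest (idx + 1)

-- the loop body: the 3-element list [head, number, tail] appended to file_split, as a triple
def aSplit (file : String) : List Char × List Char × List Char :=
  let cs := file.toList
  let n := aNumIdx cs 0
  let t := aTailIdx (cs.drop n) n
  if t = 0 then (cs.take n, cs.drop n, ([] : List Char))
  else (cs.take n, (cs.take t).drop n, cs.drop t)

-- sort key 'lambda x: (x[0].lower(), int(x[1]))'; int() raises exactly outside Pre_ (the parse
-- is none there), so the total port reads it with a default never used under Pre_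
def aKey1 (x : List Char × List Char × List Char) : List Char := PySem.Chars.lower x.1
def aKey2 (x : List Char × List Char × List Char) : Int := (PySem.Int.ofChars? x.2.1).getD 0

def file_sort (files : List String) : List String :=
  let file_split := files.foldl (fun acc file => acc ++ [aSplit file]) []
  let sortedSplit := PySem.List.sorted2 file_split aKey1 aKey2
  sortedSplit.map (fun x => String.ofList (x.1 ++ x.2.1 ++ x.2.2))  -- [''.join(file) for file in file_split]

-- ===== PORT B =====
-- 'i = 0; while i < len(f) and not f[i].isdigit(): i += 1' — walk the remaining chars carrying i
def bSkipNonDigits : List Char → Nat → Nat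
  | [], i => i
  | c :: rest, i => if !c.isDigit then bSkipNonDigits rest (i + 1) else i

-- 'j = i; while j < len(f) and f[j].isdigit(): j += 1'
def bSkipDigits : List Char → Nat → Nat
  | [], j => j
  | c :: rest, j => if c.isDigit then bSkipDigits rest (j + 1) else j

-- the tuple '(f[:i].lower(), int(f[i:j]))' built in the loop body; int() raises exactly outside
-- Pre_ (the parse is none there), so the total port reads it with a default never used under Pre_
def bKey (f : String) : List Char × Int :=
  let cs := f.toList
  let i := bSkipNonDigits cs 0
  let j := bSkipDigits (cs.drop i) i
  (PySem.Chars.lower (cs.take i), (PySem.Int.ofChars? ((cs.take j).drop i)).getD 0)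

def file_sort_alt (files : List String) : List String :=
  -- 'groups.setdefault(key, []).append(f)' stores groups[key] = groups.get(key, []) + [f]
  let groups := files.foldl (fun d f => d.modify (bKey f) [] (fun g => g ++ [f])) PySem.Dict.empty
  -- '[f for k in sorted(groups) for f in groups[k]]' — sorted() over the dict iterates its keys
  (PySem.List.sorted2 groups.keys Prod.fst Prod.snd).flatMap (fun k => groups.getD k [])

-- ===== PRECONDITION & SPEC =====
-- Pre_ excludes exactly the inputs on which A raises ValueError: a filename with no digit makes
-- int() fail (in A on the whole name, in B on the empty string); B raises there too.
def Pre_file_sort (files : List String) : Prop :=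
  ∀ f ∈ files, f.toList.any Char.isDigit = true
instance (files : List String) : Decidable (Pre_file_sort files) := by unfold Pre_file_sort; infer_instance

def pvWitness_file_sort : List String := ["img12.png", "img10.png", "IMG02.png"]

def Spec_file_sort (files : List String) (out : List String) : Prop := out = file_sort_alt files
instance (files : List String) (out : List String) : Decidable (Spec_file_sort files out) := by unfold Spec_file_sort; infer_instance

-- ===== CLAIM (what is proved, stated in full; the proofs are below) =====
def Claim_equal_file_sort : Prop := ∀ (files : List String), Dom_file_sort files → Pre_file_sort files → Spec_file_sort files (file_sort files)

-- ===== LEMMAS AND PROOFS =====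

-- Python's tuple '<' on the (head, number) key, as both sorted2 calls compute it (definitional)
def befKey (u v : List Char × Int) : Bool :=
  decide (u.1 < v.1) || (!decide (v.1 < u.1) && decide (u.2 < v.2))

theorem befKey_true (u v : List Char × Int) :
    befKey u v = true ↔ (u.1 < v.1 ∨ (¬ v.1 < u.1 ∧ u.2 < v.2)) := by
  simp [befKey]

theorem befKey_false (u v : List Char × Int) :
    befKey u v = false ↔ ¬ (u.1 < v.1 ∨ (¬ v.1 < u.1 ∧ u.2 < v.2)) := by
  rw [← befKey_true]; cases befKey u v <;> simp

theorem befKey_irrefl (u : List Char × Int) : befKey u u = false := by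
  rw [befKey_false]
  rintro (h | ⟨-, h⟩) <;> exact lt_irrefl _ h

theorem befKey_asymm (u v : List Char × Int) (h : befKey u v = true) : befKey v u = false := by
  rw [befKey_true] at h
  rw [befKey_false]
  rcases h with h | ⟨h1, h2⟩
  · rintro (h' | ⟨h1', -⟩)
    · exact lt_asymm h h'
    · exact h1' h
  · rintro (h' | ⟨-, h2'⟩)
    · exact h1 h'
    · exact lt_asymm h2 h2'

theorem befKey_trans (u v w : List Char × Int) (h1 : befKey u v = true) (h2 : befKey v w = true) :
    befKey u w = true := by
  rw [befKey_true] at h1 h2 ⊢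
  rcases h1 with h1 | ⟨h1a, h1b⟩ <;> rcases h2 with h2 | ⟨h2a, h2b⟩
  · exact Or.inl (lt_trans h1 h2)
  · exact Or.inl (lt_of_lt_of_le h1 (not_lt.1 h2a))
  · exact Or.inl (lt_of_le_of_lt (not_lt.1 h1a) h2)
  · refine Or.inr ⟨fun hw => ?_, lt_trans h1b h2b⟩
    exact absurd (lt_of_lt_of_le hw ((not_lt.1 h1a).trans (not_lt.1 h2a))) (lt_irrefl _)

theorem befKey_total (u v : List Char × Int) (h1 : befKey u v = false) (h2 : befKey v u = false) :
    u = v := by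
  rw [befKey_false] at h1 h2
  have ha : ¬ u.1 < v.1 := fun h => h1 (Or.inl h)
  have hc : ¬ v.1 < u.1 := fun h => h2 (Or.inl h)
  have hfst : u.1 = v.1 := le_antisymm (not_lt.1 hc) (not_lt.1 ha)
  have hb : ¬ u.2 < v.2 := fun h => h1 (Or.inr ⟨hc, h⟩)
  have hd : ¬ v.2 < u.2 := fun h => h2 (Or.inr ⟨ha, h⟩)
  exact Prod.ext hfst (le_antisymm (not_lt.1 hd) (not_lt.1 hb))

-- ---- generic facts about insertion sort (PySem.List.insertBy) with an abstract comparator ----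

theorem insertBy_perm {α : Type} (bef : α → α → Bool) (x : α) (ys : List α) :
    (PySem.List.insertBy bef x ys).Perm (x :: ys) := by
  induction ys with
  | nil => simp [PySem.List.insertBy]
  | cons y ys ih =>
    simp only [PySem.List.insertBy]
    split
    · exact List.Perm.refl _
    · exact (ih.cons y).trans (List.Perm.swap x y ys)

theorem foldl_insertBy_perm {α : Type} (bef : α → α → Bool) (l : List α) :
    (l.foldl (fun acc x => PySem.List.insertBy bef x acc) []).Perm l := by
  induction l using List.reverseRecOn with
  | nil => simp
  | append_singleton l x ih =>
    rw [List.foldl_append, List.foldl_cons, List.foldl_nil]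
    exact ((insertBy_perm bef x _).trans (ih.cons x)).trans (List.perm_append_singleton x l).symm

theorem insertBy_pairwise {α : Type} (bef : α → α → Bool)
    (htrans : ∀ a b c, bef a b = true → bef b c = true → bef a c = true)
    (hasym : ∀ a b, bef a b = true → bef b a = false)
    (x : α) (ys : List α) (h : ys.Pairwise (fun a b => bef b a = false)) :
    (PySem.List.insertBy bef x ys).Pairwise (fun a b => bef b a = false) := by
  induction ys with
  | nil => simp [PySem.List.insertBy]
  | cons y ys ih =>
    rw [List.pairwise_cons] at h
    simp only [PySem.List.insertBy]
    split
    · rename_i hxy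
      refine List.pairwise_cons.2 ⟨?_, List.pairwise_cons.2 ⟨h.1, h.2⟩⟩
      intro z hz
      rcases List.mem_cons.1 hz with rfl | hz
      · exact hasym _ _ hxy
      · by_contra hc
        have hzx : bef z x = true := by revert hc; cases hbx : bef z x <;> simp
        have : bef z y = true := htrans _ _ _ hzx hxy
        rw [h.1 z hz] at this; exact absurd this (by simp)
    · rename_i hxy
      refine List.pairwise_cons.2 ⟨?_, ih h.2⟩
      intro z hz
      rcases (PySem.List.mem_insertBy bef x z ys).1 hz with rfl | hz
      · simpa using hxy
      · exact h.1 z hz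

theorem foldl_insertBy_pairwise {α : Type} (bef : α → α → Bool)
    (htrans : ∀ a b c, bef a b = true → bef b c = true → bef a c = true)
    (hasym : ∀ a b, bef a b = true → bef b a = false) (l : List α) :
    (l.foldl (fun acc x => PySem.List.insertBy bef x acc) []).Pairwise (fun a b => bef b a = false) := by
  suffices h : ∀ acc : List α, acc.Pairwise (fun a b => bef b a = false) →
      (l.foldl (fun acc x => PySem.List.insertBy bef x acc) acc).Pairwise (fun a b => bef b a = false) by
    exact h [] (by simp)
  induction l with
  | nil => intro acc hacc; exact hacc
  | cons x l ih =>
    intro acc hacc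
    exact ih _ (insertBy_pairwise bef htrans hasym x acc hacc)

-- a sorted list of DISTINCT keys is strictly increasing
theorem foldl_insertBy_pairwise_strict {α : Type} (bef : α → α → Bool)
    (htrans : ∀ a b c, bef a b = true → bef b c = true → bef a c = true)
    (hasym : ∀ a b, bef a b = true → bef b a = false)
    (htot : ∀ a b, bef a b = false → bef b a = false → a = b)
    (l : List α) (hnd : l.Nodup) :
    (l.foldl (fun acc x => PySem.List.insertBy bef x acc) []).Pairwise (fun a b => bef a b = true) := by
  have h1 := foldl_insertBy_pairwise bef htrans hasym l
  have h2 : (l.foldl (fun acc x => PySem.List.insertBy bef x acc) []).Nodup :=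
    (foldl_insertBy_perm bef l).nodup_iff.2 hnd
  have h3 := List.Pairwise.and h1 (List.Pairwise.imp (fun h => h) h2)
  refine h3.imp ?_
  rintro a b ⟨hba, hne⟩
  by_contra hc
  have hab : bef a b = false := by revert hc; cases bef a b <;> simp
  exact hne (htot _ _ hab hba)

theorem insertBy_split {α : Type} (bef : α → α → Bool) (x : α) (A B : List α)
    (hA : ∀ a ∈ A, bef x a = false) (hB : ∀ b ∈ B, bef x b = true) :
    PySem.List.insertBy bef x (A ++ B) = A ++ x :: B := by
  induction A with
  | nil =>
    cases B with
    | nil => rfl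
    | cons b B => simp [PySem.List.insertBy, hB b (by simp)]
  | cons a A ih =>
    have hxa := hA a (by simp)
    simp only [List.cons_append, PySem.List.insertBy, hxa]
    simp only [Bool.false_eq_true, if_false, List.cons.injEq, true_and]
    exact ih (fun a' ha' => hA a' (by simp [ha']))

theorem insertBy_eq_takeWhile_dropWhile {α : Type} (bef : α → α → Bool) (x : α) (ys : List α) :
    PySem.List.insertBy bef x ys
      = ys.takeWhile (fun y => !bef x y) ++ x :: ys.dropWhile (fun y => !bef x y) := by
  induction ys with
  | nil => rfl
  | cons y ys ih =>
    simp only [PySem.List.insertBy, List.takeWhile_cons, List.dropWhile_cons]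
    cases hxy : bef x y <;> simp [ih]

theorem mem_dropWhile_bef {α : Type} (bef : α → α → Bool)
    (htrans : ∀ a b c, bef a b = true → bef b c = true → bef a c = true)
    (k : α) (M : List α) (hM : M.Pairwise (fun a b => bef a b = true)) :
    ∀ c ∈ M.dropWhile (fun y => !bef k y), bef k c = true := by
  induction M with
  | nil => simp
  | cons m M ih =>
    rw [List.pairwise_cons] at hM
    rw [List.dropWhile_cons]
    cases hkm : bef k m with
    | true =>
      simp only [Bool.not_true, Bool.false_eq_true, if_false]
      intro c hc
      rcases List.mem_cons.1 hc with rfl | hc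
      · exact hkm
      · exact htrans _ _ _ hkm (hM.1 c hc)
    | false =>
      simp only [Bool.not_false, if_true]
      exact ih hM.2

-- ---- THE CORE THEOREM: a stable insertion sort by key equals the concatenation, over the ----
-- ---- sorted list of DISTINCT keys, of the (order-preserving) bucket of each key           ----
theorem stable_sort_eq_groups {α κ : Type} [BEq κ] [LawfulBEq κ]
    (bef : κ → κ → Bool) (key : α → κ)
    (hirr : ∀ a, bef a a = false)
    (hasym : ∀ a b, bef a b = true → bef b a = false)
    (htrans : ∀ a b c, bef a b = true → bef b c = true → bef a c = true)
    (htot : ∀ a b, bef a b = false → bef b a = false → a = b)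
    (l : List α) :
    l.foldl (fun acc x => PySem.List.insertBy (fun p q => bef (key p) (key q)) x acc) []
      = ((PySem.Set.ofList (l.map key)).foldl (fun acc c => PySem.List.insertBy bef c acc) []).flatMap
          (fun c => l.filter (fun x => key x == c)) := by
  induction l using List.reverseRecOn with
  | nil => simp [PySem.Set.ofList]
  | append_singleton l x ih =>
    set k := key x with hk
    set K := PySem.Set.ofList (l.map key) with hK
    set SK := K.foldl (fun acc c => PySem.List.insertBy bef c acc) [] with hSK
    have hndK : K.Nodup := PySem.Set.nodup_ofList _
    have hndSK : SK.Nodup := (foldl_insertBy_perm bef K).nodup_iff.2 hndK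
    have hstrict : SK.Pairwise (fun a b => bef a b = true) :=
      foldl_insertBy_pairwise_strict bef htrans hasym htot K hndK
    have hmemSK : ∀ c, c ∈ SK ↔ c ∈ K := fun c => (foldl_insertBy_perm bef K).mem_iff
    -- the new key list and the left-hand fold step
    have hkeys : PySem.Set.ofList ((l ++ [x]).map key) = K.add k := by
      rw [List.map_append, List.map_cons, List.map_nil, PySem.Set.ofList_append_singleton]
    rw [List.foldl_append, List.foldl_cons, List.foldl_nil, ih, hkeys]
    -- bucket facts
    have hfilter_ne : ∀ c, c ≠ k →
        (l ++ [x]).filter (fun y => key y == c) = l.filter (fun y => key y == c) := by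
      intro c hc
      rw [List.filter_append]
      have hxc : (key x == c) = false := by
        simp only [beq_eq_false_iff_ne, ne_eq]
        exact fun h => hc (by rw [hk, h])
      simp [List.filter, hxc]
    have hfilter_k :
        (l ++ [x]).filter (fun y => key y == k) = l.filter (fun y => key y == k) ++ [x] := by
      have hxk : (key x == k) = true := by simp [hk]
      rw [List.filter_append]
      simp [List.filter, hxk]
    by_cases hin : K.contains k = true
    · -- key already present: its bucket grows at the end, the key list is unchanged
      have hadd : K.add k = K := if_pos hin
      rw [hadd, ← hSK]
      have hkK : k ∈ K := (PySem.Set.contains_iff K k).1 hin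
      obtain ⟨P, Q, hPQ⟩ := List.append_of_mem ((hmemSK k).2 hkK)
      have hstrict' := hPQ ▸ hstrict
      have hnd' := hPQ ▸ hndSK
      rw [List.pairwise_append] at hstrict'
      have hPk : ∀ c ∈ P, bef c k = true := fun c hc => hstrict'.2.2 c hc k (by simp)
      have hkQ : ∀ c ∈ Q, bef k c = true := (List.pairwise_cons.1 hstrict'.2.1).1
      have hkP : k ∉ P := by
        intro hmem
        exact absurd (hirr k) (by simp [hPk k hmem])
      have hkQ' : k ∉ Q := by
        intro hmem
        exact absurd (hirr k) (by simp [hkQ k hmem])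
      rw [hPQ, List.flatMap_append, List.flatMap_cons, List.flatMap_append, List.flatMap_cons]
      have hFMP : ∀ (m : List α), (∀ c ∈ P, m.filter (fun y => key y == c) = l.filter (fun y => key y == c)) →
          P.flatMap (fun c => m.filter (fun y => key y == c)) = P.flatMap (fun c => l.filter (fun y => key y == c)) := by
        intro m hm
        exact List.flatMap_congr (fun c hc => hm c hc)
      rw [hFMP (l ++ [x]) (fun c hc => hfilter_ne c (fun h => hkP (h ▸ hc)))]
      rw [show Q.flatMap (fun c => (l ++ [x]).filter (fun y => key y == c))
            = Q.flatMap (fun c => l.filter (fun y => key y == c)) from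
          List.flatMap_congr (fun c hc => hfilter_ne c (fun h => hkQ' (h ▸ hc)))]
      rw [hfilter_k]
      -- insert x: it skips the P-buckets and its own bucket, and stops before the Q-buckets
      have := insertBy_split (fun p q => bef (key p) (key q)) x
        (P.flatMap (fun c => l.filter (fun y => key y == c)) ++ l.filter (fun y => key y == k))
        (Q.flatMap (fun c => l.filter (fun y => key y == c)))
        (by
          intro a ha
          rcases List.mem_append.1 ha with ha | ha
          · obtain ⟨c, hcP, hac⟩ := List.mem_flatMap.1 ha
            have : key a = c := by simpa using List.of_mem_filter hac
            show bef (key x) (key a) = false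
            rw [this, ← hk]
            exact hasym _ _ (hPk c hcP)
          · have : key a = k := by simpa using List.of_mem_filter ha
            show bef (key x) (key a) = false
            rw [this, ← hk]; exact hirr k)
        (by
          intro b hb
          obtain ⟨c, hcQ, hbc⟩ := List.mem_flatMap.1 hb
          have : key b = c := by simpa using List.of_mem_filter hbc
          show bef (key x) (key b) = true
          rw [this, ← hk]
          exact hkQ c hcQ)
      rw [← List.append_assoc, this]
      simp
    · -- new key: it is appended to the key list; sorting inserts it at its unique position
      have hadd : K.add k = K ++ [k] := if_neg hin
      have hkK : k ∉ K := fun hmem => hin ((PySem.Set.contains_iff K k).2 hmem)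
      have hkl : ∀ y ∈ l, key y ≠ k := by
        intro y hy h
        exact hkK ((PySem.Set.mem_ofList _ _).2 (h ▸ List.mem_map_of_mem hy))
      have hflk : l.filter (fun y => key y == k) = [] := by
        rw [List.filter_eq_nil_iff]
        intro y hy
        simp [hkl y hy]
      rw [hadd, List.foldl_append, List.foldl_cons, List.foldl_nil, ← hSK]
      rw [insertBy_eq_takeWhile_dropWhile bef k SK]
      set P := SK.takeWhile (fun y => !bef k y) with hP
      set Q := SK.dropWhile (fun y => !bef k y) with hQ
      have hSKPQ : SK = P ++ Q := (List.takeWhile_append_dropWhile).symm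
      have hPk : ∀ c ∈ P, bef k c = false := by
        intro c hc
        have := List.mem_takeWhile_imp hc
        simpa using this
      have hkQ : ∀ c ∈ Q, bef k c = true := mem_dropWhile_bef bef htrans k SK hstrict
      have hkSK : k ∉ SK := fun h => hkK ((hmemSK k).1 h)
      have hkP : k ∉ P := fun hmem => hkSK (by rw [hSKPQ]; exact List.mem_append_left Q hmem)
      have hkQ' : k ∉ Q := fun hmem => hkSK (by rw [hSKPQ]; exact List.mem_append_right P hmem)
      rw [List.flatMap_append, List.flatMap_cons]
      rw [show P.flatMap (fun c => (l ++ [x]).filter (fun y => key y == c))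
            = P.flatMap (fun c => l.filter (fun y => key y == c)) from
          List.flatMap_congr (fun c hc => hfilter_ne c (fun h => hkP (h ▸ hc)))]
      rw [show Q.flatMap (fun c => (l ++ [x]).filter (fun y => key y == c))
            = Q.flatMap (fun c => l.filter (fun y => key y == c)) from
          List.flatMap_congr (fun c hc => hfilter_ne c (fun h => hkQ' (h ▸ hc)))]
      rw [hfilter_k, hflk]
      rw [hSKPQ, List.flatMap_append]
      have := insertBy_split (fun p q => bef (key p) (key q)) x
        (P.flatMap (fun c => l.filter (fun y => key y == c)))
        (Q.flatMap (fun c => l.filter (fun y => key y == c)))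
        (by
          intro a ha
          obtain ⟨c, hcP, hac⟩ := List.mem_flatMap.1 ha
          have : key a = c := by simpa using List.of_mem_filter hac
          show bef (key x) (key a) = false
          rw [this, ← hk]
          exact hPk c hcP)
        (by
          intro b hb
          obtain ⟨c, hcQ, hbc⟩ := List.mem_flatMap.1 hb
          have : key b = c := by simpa using List.of_mem_filter hbc
          show bef (key x) (key b) = true
          rw [this, ← hk]
          exact hkQ c hcQ)
      rw [this]
      simp

-- ---- A-side: scan equalities (A's two index loops against B's two while loops) ----

theorem bSkipNonDigits_le (l : List Char) (i : Nat) : bSkipNonDigits l i ≤ i + l.length := by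
  induction l generalizing i with
  | nil => simp [bSkipNonDigits]
  | cons c rest ih =>
    simp only [bSkipNonDigits]
    split
    · calc bSkipNonDigits rest (i + 1) ≤ (i + 1) + rest.length := ih (i + 1)
        _ = i + (c :: rest).length := by simp; omega
    · simp

theorem bSkipDigits_ge (l : List Char) (i : Nat) : i ≤ bSkipDigits l i := by
  induction l generalizing i with
  | nil => simp [bSkipDigits]
  | cons c rest ih =>
    simp only [bSkipDigits]
    split
    · exact le_trans (Nat.le_succ i) (ih (i + 1))
    · exact le_refl i

theorem aNumIdx_eq_bSkipNonDigits (l : List Char) (i : Nat) (h : l.any Char.isDigit = true) :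
    aNumIdx l i = bSkipNonDigits l i := by
  induction l generalizing i with
  | nil => simp at h
  | cons c rest ih =>
    by_cases hc : c.isDigit
    · simp [aNumIdx, bSkipNonDigits, hc]
    · have hrest : rest.any Char.isDigit = true := by
        simp [List.any_cons, hc] at h; simpa using h
      simp [aNumIdx, bSkipNonDigits, hc, ih (i + 1) hrest]

theorem aTailIdx_zero_or_ge (l : List Char) (i : Nat) : aTailIdx l i = 0 ∨ i ≤ aTailIdx l i := by
  induction l generalizing i with
  | nil => exact Or.inl rfl
  | cons c rest ih =>
    by_cases hc : c.isDigit
    · rcases ih (i + 1) with h | h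
      · exact Or.inl (by simp [aTailIdx, hc, h])
      · exact Or.inr (by simp [aTailIdx, hc]; omega)
    · exact Or.inr (by simp [aTailIdx, hc])

theorem aTailIdx_eq_bSkipDigits (l : List Char) (i : Nat) (h : l.all Char.isDigit = false) :
    aTailIdx l i = bSkipDigits l i := by
  induction l generalizing i with
  | nil => simp at h
  | cons c rest ih =>
    by_cases hc : c.isDigit
    · have hrest : rest.all Char.isDigit = false := by
        simp [List.all_cons, hc] at h; simpa using h
      simp [aTailIdx, bSkipDigits, hc, ih (i + 1) hrest]
    · simp [aTailIdx, bSkipDigits, hc]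

theorem aTailIdx_all (l : List Char) (i : Nat) (h : l.all Char.isDigit = true) : aTailIdx l i = 0 := by
  induction l generalizing i with
  | nil => rfl
  | cons c rest ih =>
    rw [List.all_cons, Bool.and_eq_true] at h
    simp [aTailIdx, h.1, ih (i + 1) h.2]

theorem bSkipDigits_all (l : List Char) (i : Nat) (h : l.all Char.isDigit = true) :
    bSkipDigits l i = i + l.length := by
  induction l generalizing i with
  | nil => simp [bSkipDigits]
  | cons c rest ih =>
    rw [List.all_cons, Bool.and_eq_true] at h
    simp [bSkipDigits, h.1, ih (i + 1) h.2]; omega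

theorem bSkipNonDigits_zero_head (c : Char) (rest : List Char)
    (h : bSkipNonDigits (c :: rest) 0 = 0) : c.isDigit = true := by
  by_contra hc
  simp only [bSkipNonDigits, Bool.not_eq_true] at h hc
  simp [hc] at h
  have : ∀ (l : List Char) (i : Nat), i ≤ bSkipNonDigits l i := by
    intro l
    induction l with
    | nil => intro i; simp [bSkipNonDigits]
    | cons d l ih =>
      intro i
      simp only [bSkipNonDigits]
      split
      · exact le_trans (Nat.le_succ i) (ih (i + 1))
      · exact le_refl i
  have := this rest 1
  omega

-- A's split joined back is the filename
theorem aSplit_fst (f : String) : (aSplit f).1 = f.toList.take (aNumIdx f.toList 0) := by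
  simp only [aSplit]
  split <;> rfl

theorem aSplit_num (f : String) :
    (aSplit f).2.1 =
      if aTailIdx (f.toList.drop (aNumIdx f.toList 0)) (aNumIdx f.toList 0) = 0 then
        f.toList.drop (aNumIdx f.toList 0)
      else (f.toList.take (aTailIdx (f.toList.drop (aNumIdx f.toList 0)) (aNumIdx f.toList 0))).drop
        (aNumIdx f.toList 0) := by
  simp only [aSplit]
  split <;> simp_all

theorem aSplit_tail (f : String) :
    (aSplit f).2.2 =
      if aTailIdx (f.toList.drop (aNumIdx f.toList 0)) (aNumIdx f.toList 0) = 0 then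
        ([] : List Char)
      else f.toList.drop (aTailIdx (f.toList.drop (aNumIdx f.toList 0)) (aNumIdx f.toList 0)) := by
  simp only [aSplit]
  split <;> simp_all

theorem aSplit_join (f : String) :
    (aSplit f).1 ++ (aSplit f).2.1 ++ (aSplit f).2.2 = f.toList := by
  rw [aSplit_fst, aSplit_num, aSplit_tail]
  set cs := f.toList with hcs
  set n := aNumIdx cs 0 with hn
  set t := aTailIdx (cs.drop n) n with ht
  by_cases h0 : t = 0
  · simp [h0]
  · rcases aTailIdx_zero_or_ge (cs.drop n) n with h | h
    · exact absurd (ht ▸ h) h0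
    · have hnt : n ≤ t := ht ▸ h
      simp only [h0, if_false]
      have h1 : cs.take n = (cs.take t).take n := by
        rw [List.take_take]; congr 1; omega
      calc cs.take n ++ (cs.take t).drop n ++ cs.drop t
          = ((cs.take t).take n ++ (cs.take t).drop n) ++ cs.drop t := by rw [← h1, List.append_assoc]
        _ = cs.take t ++ cs.drop t := by rw [List.take_append_drop]
        _ = cs := List.take_append_drop t cs

-- A's sort keys of the split equal B's key of the filename, on filenames containing a digit
theorem keys_eq (f : String) (h : f.toList.any Char.isDigit = true) :
    aKey1 (aSplit f) = (bKey f).1 ∧ aKey2 (aSplit f) = (bKey f).2 := by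
  unfold aKey1 aKey2
  rw [aSplit_fst, aSplit_num]
  simp only [bKey]
  set cs := f.toList with hcs
  have hn : aNumIdx cs 0 = bSkipNonDigits cs 0 := aNumIdx_eq_bSkipNonDigits cs 0 h
  rw [hn]
  set i := bSkipNonDigits cs 0 with hi
  have hile : i ≤ cs.length := by simpa using bSkipNonDigits_le cs 0
  refine ⟨rfl, ?_⟩
  by_cases hall : (cs.drop i).all Char.isDigit = true
  · have ht : aTailIdx (cs.drop i) i = 0 := aTailIdx_all _ _ hall
    have hj : bSkipDigits (cs.drop i) i = i + (cs.drop i).length := bSkipDigits_all _ _ hall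
    have hlen : i + (cs.drop i).length = cs.length := by simp [List.length_drop]; omega
    rw [ht, hj, hlen, List.take_length]
    simp
  · have hallf : (cs.drop i).all Char.isDigit = false := by simpa using hall
    have ht : aTailIdx (cs.drop i) i = bSkipDigits (cs.drop i) i := aTailIdx_eq_bSkipDigits _ _ hallf
    have htpos : aTailIdx (cs.drop i) i ≠ 0 := by
      rw [ht]
      rcases Nat.eq_zero_or_pos i with hi0 | hip
      · have hne : cs ≠ [] := by
          intro hnil; rw [hnil] at h; simp at h
        obtain ⟨c, rest, hcr⟩ := List.exists_cons_of_ne_nil hne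
        have hc : c.isDigit = true := by
          apply bSkipNonDigits_zero_head c rest
          rw [← hcr, ← hi, hi0]
        rw [hi0, hcr, List.drop_zero]
        simp [bSkipDigits, hc]
        have := bSkipDigits_ge rest 1
        omega
      · have := bSkipDigits_ge (cs.drop i) i
        omega
    rw [if_neg htpos, ht]

-- sorting a mapped list: the insertion sort commutes with map
theorem insertBy_map {α β : Type} (g : α → β) (bef : β → β → Bool) (x : α) (ys : List α) :
    PySem.List.insertBy bef (g x) (ys.map g)
      = (PySem.List.insertBy (fun a b => bef (g a) (g b)) x ys).map g := by
  induction ys with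
  | nil => simp [PySem.List.insertBy]
  | cons y ys ih =>
    simp only [List.map_cons, PySem.List.insertBy]
    split <;> simp_all

theorem foldl_insertBy_map {α β : Type} (g : α → β) (bef : β → β → Bool) (xs : List α) :
    ∀ acc : List α,
      (xs.map g).foldl (fun acc x => PySem.List.insertBy bef x acc) (acc.map g)
        = (xs.foldl (fun acc x => PySem.List.insertBy (fun a b => bef (g a) (g b)) x acc) acc).map g := by
  induction xs with
  | nil => intro acc; simp
  | cons x xs ih =>
    intro acc
    simp only [List.map_cons, List.foldl_cons]
    rw [insertBy_map, ih]

-- the insertion sort only compares list elements: congruent comparison functions sort identically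
theorem insertBy_congr {α : Type} (bef bef' : α → α → Bool) (x : α) (ys : List α)
    (h : ∀ y ∈ ys, bef x y = bef' x y) :
    PySem.List.insertBy bef x ys = PySem.List.insertBy bef' x ys := by
  induction ys with
  | nil => rfl
  | cons y ys ih =>
    simp only [PySem.List.insertBy]
    rw [h y (by simp)]
    split
    · rfl
    · rw [ih (fun z hz => h z (by simp [hz]))]

theorem foldl_insertBy_congr {α : Type} (bef bef' : α → α → Bool) (P : α → Prop)
    (hb : ∀ a b, P a → P b → bef a b = bef' a b) (xs : List α) :
    ∀ acc : List α, (∀ x ∈ xs, P x) → (∀ x ∈ acc, P x) →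
      xs.foldl (fun acc x => PySem.List.insertBy bef x acc) acc
        = xs.foldl (fun acc x => PySem.List.insertBy bef' x acc) acc := by
  induction xs with
  | nil => intro acc _ _; rfl
  | cons x xs ih =>
    intro acc hxs hacc
    rw [List.foldl_cons, List.foldl_cons,
      insertBy_congr bef bef' x acc (fun y hy => hb x y (hxs x (by simp)) (hacc y hy))]
    exact ih _ (fun z hz => hxs z (by simp [hz]))
      (fun z hz => by
        rcases (PySem.List.mem_insertBy bef' x z acc).1 hz with h | h
        · exact h ▸ hxs x (by simp)
        · exact hacc z h)

-- A reduced to the stable insertion sort of the filenames themselves by B's key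
theorem file_sort_eq_stable_sort (files : List String)
    (hpre : ∀ f ∈ files, f.toList.any Char.isDigit = true) :
    file_sort files
      = files.foldl (fun acc x => PySem.List.insertBy (fun p q => befKey (bKey p) (bKey q)) x acc) [] := by
  unfold file_sort
  simp only [PySem.List.foldl_append_singleton_eq_map, List.nil_append]
  show (PySem.List.sorted2 (files.map aSplit) aKey1 aKey2).map
      (fun x => String.ofList (x.1 ++ x.2.1 ++ x.2.2)) = _
  unfold PySem.List.sorted2
  simp only [if_neg (by decide : ¬ (false = true))]
  rw [show ([] : List (List Char × List Char × List Char)) = List.map aSplit [] from rfl,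
    foldl_insertBy_map]
  rw [List.map_map]
  have hmap : ∀ l : List String,
      l.map ((fun x : List Char × List Char × List Char =>
          String.ofList (x.1 ++ x.2.1 ++ x.2.2)) ∘ aSplit) = l := by
    intro l
    rw [show ((fun x : List Char × List Char × List Char =>
        String.ofList (x.1 ++ x.2.1 ++ x.2.2)) ∘ aSplit) = id from ?_, List.map_id]
    funext f
    simp [Function.comp, aSplit_join f, String.ofList_toList]
  rw [hmap]
  exact foldl_insertBy_congr _ _ (fun f => f.toList.any Char.isDigit = true)
    (fun a b ha hb => by
      obtain ⟨h1a, h2a⟩ := keys_eq a ha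
      obtain ⟨h1b, h2b⟩ := keys_eq b hb
      show (decide (aKey1 (aSplit a) < aKey1 (aSplit b)) ||
          (!decide (aKey1 (aSplit b) < aKey1 (aSplit a)) && decide (aKey2 (aSplit a) < aKey2 (aSplit b)))) = _
      simp only [h1a, h2a, h1b, h2b]
      rfl)
    files [] hpre (by intro x hx; simp at hx)

-- B unfolded: the dict of buckets read back as sorted distinct keys and per-key filters
theorem file_sort_alt_eq_groups (files : List String) :
    file_sort_alt files
      = ((PySem.Set.ofList (files.map bKey)).foldl
            (fun acc c => PySem.List.insertBy befKey c acc) []).flatMap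
          (fun c => files.filter (fun f => bKey f == c)) := by
  show (PySem.List.sorted2
      (files.foldl (fun d f => d.modify (bKey f) [] (fun g => g ++ [f])) PySem.Dict.empty).keys
      Prod.fst Prod.snd).flatMap
      (fun k => (files.foldl (fun d f => d.modify (bKey f) [] (fun g => g ++ [f])) PySem.Dict.empty).getD k [])
      = _
  have hkeys : (files.foldl (fun d f => d.modify (bKey f) [] (fun g => g ++ [f]))
      PySem.Dict.empty).keys = PySem.Set.ofList (files.map bKey) := by
    rw [PySem.Dict.keys_foldl_modify_key files bKey [] (fun _ x g => g ++ [x]) PySem.Dict.empty,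
      PySem.Dict.keys_empty, PySem.Set.update_nil_left]
  have hgetD : ∀ c, (files.foldl (fun d f => d.modify (bKey f) [] (fun g => g ++ [f]))
      PySem.Dict.empty).getD c [] = files.filter (fun f => bKey f == c) := by
    intro c
    have hfold : files.foldl (fun d f => d.modify (bKey f) [] (fun g => g ++ [f])) PySem.Dict.empty
        = (files.map (fun f => (bKey f, f))).foldl
            (fun d p => d.modify p.1 [] (fun g => g ++ [p.2])) PySem.Dict.empty := by
      rw [List.foldl_map]
    rw [hfold, PySem.Dict.getD_foldl_modify_append, PySem.Dict.getD_empty, List.nil_append,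
      List.filter_map]
    simp [Function.comp_def]
  rw [hkeys]
  have hsorted : PySem.List.sorted2 (PySem.Set.ofList (files.map bKey)) Prod.fst Prod.snd
      = (PySem.Set.ofList (files.map bKey)).foldl
          (fun acc c => PySem.List.insertBy befKey c acc) [] := rfl
  rw [hsorted]
  exact List.flatMap_congr (fun c _ => hgetD c)

-- ===== VERDICT (by name: the statement is the Claim_ definition above) =====
theorem file_sort_spec : Claim_equal_file_sort := by
  intro files _hdom hpre
  unfold Spec_file_sort
  rw [file_sort_eq_stable_sort files hpre, file_sort_alt_eq_groups files]
  exact stable_sort_eq_groups befKey bKey befKey_irrefl befKey_asymm befKey_trans befKey_total files
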